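-- pv_equiv track=rewrite | github.com/pfnet-research/jfbench | src/jfbench/constraints/notation/grouping.py | _check_grouping_core
-- ===== SOURCE A (Python) =====
-- def _check_grouping_core(digits_only_and_seps: str, max_group_size: int, sep_char: str) -> bool:
--     """
--     Validate grouping from the right in chunks of max_group_size digits.
--     Rule: each group from the right must have exactly max_group_size digits,
--     and only the leftmost group may have 1..max_group_size digits.
--     """
--     # Disallow consecutive separators and leading/trailing separators
--     if digits_only_and_seps.startswith(sep_char) or digits_only_and_seps.endswith(sep_char):
--         return False
--     if sep_char * 2 in digits_only_and_seps:
--         return False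
--
--     parts = digits_only_and_seps.split(sep_char)
--     # All parts must consist of digits only (non-empty)
--     if not all(part.isdigit() and len(part) > 0 for part in parts):
--         return False
--
--     # Validate group sizes from the right
--     for idx_from_right, part in enumerate(reversed(parts), start=1):
--         if idx_from_right == len(parts):  # leftmost group
--             if not (1 <= len(part) <= max_group_size):
--                 return False
--         else:  # groups to the right must be exactly max_group_size
--             if len(part) != max_group_size:
--                 return False
--     return True
-- ===== SOURCE B (Python) =====
-- def _check_grouping_core(digits_only_and_seps: str, max_group_size: int, sep_char: str) -> bool:
--     # Disallow consecutive separators and leading/trailing separators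
--     if digits_only_and_seps.startswith(sep_char) or digits_only_and_seps.endswith(sep_char):
--         return False
--     if sep_char * 2 in digits_only_and_seps:
--         return False
--     # Single left-to-right scan: count digits of the current group; a separator
--     # closes the group (first group 1..max, later groups exactly max).
--     n = len(digits_only_and_seps)
--     k = len(sep_char)  # > 0 here: an empty sep_char was rejected by startswith
--     i = 0
--     count = 0
--     seen_sep = False
--     while i < n:
--         if digits_only_and_seps.startswith(sep_char, i):
--             if count == 0:
--                 return False
--             if seen_sep:
--                 if count != max_group_size:
--                     return False
--             else:
--                 if not (1 <= count <= max_group_size):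
--                     return False
--             count = 0
--             seen_sep = True
--             i += k
--         elif digits_only_and_seps[i].isdigit():
--             count += 1
--             i += 1
--         else:
--             return False
--     if count == 0:
--         return False
--     if seen_sep:
--         return count == max_group_size
--     return 1 <= count <= max_group_size
-- ===== Notes on version B (the rewrite author's own statement) =====
-- stated objective: alternative
-- what changed: B replaces A's split-into-a-parts-list-then-two-passes (an all() pass plus a reversed enumerate loop) with a single fused left-to-right scan that maintains only a digit counter and a seen-separator flag and never materializes the parts list.
import Mathlib
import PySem

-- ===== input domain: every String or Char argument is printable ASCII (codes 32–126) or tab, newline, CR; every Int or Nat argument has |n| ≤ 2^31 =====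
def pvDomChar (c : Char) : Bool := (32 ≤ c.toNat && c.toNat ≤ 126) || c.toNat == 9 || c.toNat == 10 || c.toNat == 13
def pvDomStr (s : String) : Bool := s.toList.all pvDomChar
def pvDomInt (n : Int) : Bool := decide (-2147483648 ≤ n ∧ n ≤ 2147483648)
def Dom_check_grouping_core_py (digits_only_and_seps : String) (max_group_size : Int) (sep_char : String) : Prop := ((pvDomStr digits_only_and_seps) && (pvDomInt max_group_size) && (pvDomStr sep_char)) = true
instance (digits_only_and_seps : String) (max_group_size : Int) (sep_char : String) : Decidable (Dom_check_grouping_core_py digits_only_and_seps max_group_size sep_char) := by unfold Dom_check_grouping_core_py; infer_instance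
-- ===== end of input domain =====

-- B: single fused left-to-right scan (digit counter + seen-separator flag) instead of building the parts list; alternative decomposition, not claimed faster.


-- ===== PORT A =====
-- helper for A's 'for idx_from_right, part in enumerate(reversed(parts), start=1)' loop
def pvALoop (m : Int) (n : Nat) : List (List Char) → Nat → Bool
  | [], _ => true
  | p :: rest, idx =>
      if idx = n then
        if ¬ (1 ≤ (p.length : Int) ∧ (p.length : Int) ≤ m) then false
        else pvALoop m n rest (idx + 1)
      else
        if (p.length : Int) ≠ m then false
        else pvALoop m n rest (idx + 1)

def check_grouping_core_py (digits_only_and_seps : String) (max_group_size : Int) (sep_char : String) : Bool :=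
  let cs := digits_only_and_seps.toList
  let sp := sep_char.toList
  if PySem.Chars.startswith cs sp || PySem.Chars.endswith cs sp then false
  else if PySem.Chars.isIn (sp ++ sp) cs then false
  else
    let parts := PySem.Chars.splitOn cs sp
    if ¬ (parts.all fun part => PySem.Chars.strIsdigit part && decide (0 < part.length)) then false
    else pvALoop max_group_size parts.length parts.reverse 1

-- ===== PORT B =====
-- Source B's while loop: fuel = remaining length + 1 (the loop consumes ≥ 1 char per step)
def pvBScan (sp : List Char) (m : Int) : Nat → List Char → Int → Bool → Bool
  | _, [], count, seen =>
      if count == 0 then false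
      else if seen then count == m
      else decide (1 ≤ count ∧ count ≤ m)
  | 0, _ :: _, _, _ => false
  | fuel + 1, c :: rest, count, seen =>
      if PySem.Chars.startswith (c :: rest) sp then
        if count == 0 then false
        else if seen then
          if count != m then false
          else pvBScan sp m fuel ((c :: rest).drop sp.length) 0 true
        else
          if ¬ (1 ≤ count ∧ count ≤ m) then false
          else pvBScan sp m fuel ((c :: rest).drop sp.length) 0 true
      else if PySem.Chars.isdigit c then pvBScan sp m fuel rest (count + 1) seen
      else false

def check_grouping_core_py_alt (digits_only_and_seps : String) (max_group_size : Int) (sep_char : String) : Bool :=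
  let cs := digits_only_and_seps.toList
  let sp := sep_char.toList
  if PySem.Chars.startswith cs sp || PySem.Chars.endswith cs sp then false
  else if PySem.Chars.isIn (sp ++ sp) cs then false
  else pvBScan sp max_group_size (cs.length + 1) cs 0 false

-- ===== PRECONDITION & SPEC =====
def Spec_check_grouping_core_py (digits_only_and_seps : String) (max_group_size : Int) (sep_char : String) (out : Bool) : Prop := out = check_grouping_core_py_alt digits_only_and_seps max_group_size sep_char
instance (digits_only_and_seps : String) (max_group_size : Int) (sep_char : String) (out : Bool) : Decidable (Spec_check_grouping_core_py digits_only_and_seps max_group_size sep_char out) := by unfold Spec_check_grouping_core_py; infer_instance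

-- ===== CLAIM (what is proved, stated in full; the proofs are below) =====
def Claim_equal_check_grouping_core_py : Prop := ∀ (digits_only_and_seps : String) (max_group_size : Int) (sep_char : String), Dom_check_grouping_core_py digits_only_and_seps max_group_size sep_char → Spec_check_grouping_core_py digits_only_and_seps max_group_size sep_char (check_grouping_core_py digits_only_and_seps max_group_size sep_char)

-- ===== LEMMAS AND PROOFS =====

-- apply a function to the head of a list, keep the tail
def pvMapHead (f : List Char → List Char) : List (List Char) → List (List Char)
  | [] => []
  | p :: rest => f p :: rest

-- the check B's scan performs on the parts still ahead, with `count` digits of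
-- the current group already consumed and `seen` recording whether a separator was seen
def pvChk (m : Int) : Int → Bool → List (List Char) → Bool
  | _, _, [] => true
  | count, seen, [p] =>
      p.all PySem.Chars.isdigit &&
        (!((count + (p.length : Int)) == 0) &&
          (if seen then (count + (p.length : Int)) == m
           else decide (1 ≤ count + (p.length : Int) ∧ count + (p.length : Int) ≤ m)))
  | count, seen, p :: q :: rest =>
      (p.all PySem.Chars.isdigit &&
        (!((count + (p.length : Int)) == 0) &&
          (if seen then (count + (p.length : Int)) == m
           else decide (1 ≤ count + (p.length : Int) ∧ count + (p.length : Int) ≤ m)))) &&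
      pvChk m 0 true (q :: rest)

-- right-to-left size check A's loop amounts to, on the reversed parts list
def pvSizesRev (m : Int) : List (List Char) → Bool
  | [] => true
  | [p] => decide (1 ≤ (p.length : Int) ∧ (p.length : Int) ≤ m)
  | p :: q :: rest => decide ((p.length : Int) = m) && pvSizesRev m (q :: rest)

-- splitOn.go step equations
theorem pv_go_zero (sp l cur : List Char) (acc : List (List Char)) :
    PySem.Chars.splitOn.go sp 0 l cur acc = ((cur.reverse ++ l) :: acc).reverse := by
  simp [PySem.Chars.splitOn.go]

theorem pv_go_nil (sp cur : List Char) (acc : List (List Char)) (f : Nat) :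
    PySem.Chars.splitOn.go sp (f + 1) [] cur acc = (cur.reverse :: acc).reverse := by
  simp [PySem.Chars.splitOn.go]

theorem pv_go_pos (sp cur : List Char) (acc : List (List Char)) (f : Nat) (c : Char)
    (rest : List Char) (hp : sp.isPrefixOf (c :: rest)) :
    PySem.Chars.splitOn.go sp (f + 1) (c :: rest) cur acc
      = PySem.Chars.splitOn.go sp f ((c :: rest).drop sp.length) [] (cur.reverse :: acc) := by
  rw [PySem.Chars.splitOn.go]; simp [hp]

theorem pv_go_neg (sp cur : List Char) (acc : List (List Char)) (f : Nat) (c : Char)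
    (rest : List Char) (hp : ¬ sp.isPrefixOf (c :: rest)) :
    PySem.Chars.splitOn.go sp (f + 1) (c :: rest) cur acc
      = PySem.Chars.splitOn.go sp f rest (c :: cur) acc := by
  rw [PySem.Chars.splitOn.go]; simp [hp]

theorem pv_mapHead_id : ∀ (ps : List (List Char)), pvMapHead (fun x => x) ps = ps := by
  intro ps; cases ps <;> simp [pvMapHead]

theorem pv_go_acc_cur (sp : List Char) : ∀ (fuel : Nat) (l cur : List Char) (acc : List (List Char)),
    PySem.Chars.splitOn.go sp fuel l cur acc
      = acc.reverse ++ pvMapHead (fun x => cur.reverse ++ x) (PySem.Chars.splitOn.go sp fuel l [] []) := by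
  intro fuel
  induction fuel with
  | zero => intro l cur acc; simp [pv_go_zero, pvMapHead]
  | succ f ih =>
      intro l cur acc
      cases l with
      | nil => simp [pv_go_nil, pvMapHead]
      | cons c rest =>
          by_cases hp : sp.isPrefixOf (c :: rest)
          · rw [pv_go_pos sp cur acc f c rest hp, pv_go_pos sp [] [] f c rest hp]
            simp only [List.reverse_nil]
            rw [ih _ [] (cur.reverse :: acc), ih _ [] ([[]] : List (List Char))]
            simp [pvMapHead]
          · rw [pv_go_neg sp cur acc f c rest hp, pv_go_neg sp [] [] f c rest hp]
            rw [ih rest (c :: cur) acc, ih rest [c] []]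
            cases hps : PySem.Chars.splitOn.go sp f rest [] [] with
            | nil => simp [pvMapHead]
            | cons q qs => simp [pvMapHead]

theorem pv_go_ne_nil (sp : List Char) : ∀ (fuel : Nat) (l cur : List Char) (acc : List (List Char)),
    PySem.Chars.splitOn.go sp fuel l cur acc ≠ [] := by
  intro fuel
  induction fuel with
  | zero => intro l cur acc; simp [pv_go_zero]
  | succ f ih =>
      intro l cur acc
      cases l with
      | nil => simp [pv_go_nil]
      | cons c rest =>
          by_cases hp : sp.isPrefixOf (c :: rest)
          · rw [pv_go_pos sp cur acc f c rest hp]; exact ih _ _ _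
          · rw [pv_go_neg sp cur acc f c rest hp]; exact ih _ _ _

-- the three step equations for P fuel l := go sp fuel l [] []
theorem pv_P_nil (sp : List Char) (fuel : Nat) :
    PySem.Chars.splitOn.go sp fuel [] [] [] = [[]] := by
  cases fuel with
  | zero => simp [pv_go_zero]
  | succ f => simp [pv_go_nil]

theorem pv_P_pos (sp : List Char) (f : Nat) (c : Char) (rest : List Char)
    (hp : sp.isPrefixOf (c :: rest)) :
    PySem.Chars.splitOn.go sp (f + 1) (c :: rest) [] []
      = [] :: PySem.Chars.splitOn.go sp f ((c :: rest).drop sp.length) [] [] := by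
  rw [pv_go_pos sp [] [] f c rest hp]
  simp only [List.reverse_nil]
  rw [pv_go_acc_cur sp f _ [] [[]]]
  simp only [List.reverse_nil, List.nil_append]
  rw [pv_mapHead_id]
  rfl

theorem pv_P_neg (sp : List Char) (f : Nat) (c : Char) (rest : List Char)
    (hp : ¬ sp.isPrefixOf (c :: rest)) :
    PySem.Chars.splitOn.go sp (f + 1) (c :: rest) [] []
      = pvMapHead (fun x => c :: x) (PySem.Chars.splitOn.go sp f rest [] []) := by
  rw [pv_go_neg sp [] [] f c rest hp, pv_go_acc_cur sp f rest [c] []]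
  simp

-- pvChk facts
theorem pv_chk_head (m count : Int) (seen : Bool) (p : List Char) (ps : List (List Char)) :
    pvChk m count seen (p :: ps)
      = ((p.all PySem.Chars.isdigit &&
          (!((count + (p.length : Int)) == 0) &&
            (if seen then (count + (p.length : Int)) == m
             else decide (1 ≤ count + (p.length : Int) ∧ count + (p.length : Int) ≤ m)))) &&
         pvChk m 0 true ps) := by
  cases ps with
  | nil => simp [pvChk]
  | cons q qs => rfl

theorem pv_chk_mapHead_digit (m count : Int) (seen : Bool) (c : Char)
    (hc : PySem.Chars.isdigit c = true) :
    ∀ (ps : List (List Char)), ps ≠ [] →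
      pvChk m count seen (pvMapHead (fun x => c :: x) ps) = pvChk m (count + 1) seen ps := by
  intro ps hps
  cases ps with
  | nil => exact absurd rfl hps
  | cons p rest =>
      simp only [pvMapHead, pv_chk_head]
      have hlen : ((c :: p).length : Int) = (p.length : Int) + 1 := by
        simp only [List.length_cons]
        push_cast
        ring
      rw [hlen]
      have harith : count + ((p.length : Int) + 1) = (count + 1) + (p.length : Int) := by ring
      rw [harith]
      simp [hc]

theorem pv_chk_mapHead_nondigit (m count : Int) (seen : Bool) (c : Char)
    (hc : PySem.Chars.isdigit c = false) :
    ∀ (ps : List (List Char)), ps ≠ [] →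
      pvChk m count seen (pvMapHead (fun x => c :: x) ps) = false := by
  intro ps hps
  cases ps with
  | nil => exact absurd rfl hps
  | cons p rest => simp [pvMapHead, pv_chk_head, hc]

-- B's scan equals pvChk of the split parts
theorem pv_bscan_eq_chk (sp : List Char) (m : Int) (hsp : sp ≠ []) :
    ∀ (fuel : Nat) (l : List Char) (count : Int) (seen : Bool), l.length < fuel →
      pvBScan sp m fuel l count seen
        = pvChk m count seen (PySem.Chars.splitOn.go sp fuel l [] []) := by
  intro fuel
  induction fuel with
  | zero => intro l count seen h; omega
  | succ f ih =>
      intro l count seen h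
      cases l with
      | nil =>
          rw [pv_P_nil]
          simp only [pvBScan, pvChk]
          by_cases h0 : count = 0
          · simp [h0]
          · have : (count == 0) = false := by simp [h0]
            simp [this]
      | cons c rest =>
          by_cases hp : sp.isPrefixOf (c :: rest)
          · have hdrop : ((c :: rest).drop sp.length).length < f := by
              have h1 : 1 ≤ sp.length := by
                cases sp with
                | nil => exact absurd rfl hsp
                | cons _ _ => simp
              simp only [List.length_drop, List.length_cons]
              simp only [List.length_cons] at h
              omega
            have hrec := ih ((c :: rest).drop sp.length) 0 true hdrop
            rw [pv_P_pos sp f c rest hp]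
            have hne := pv_go_ne_nil sp f ((c :: rest).drop sp.length) [] []
            rw [pv_chk_head]
            simp only [pvBScan]
            have hsw : PySem.Chars.startswith (c :: rest) sp = true := by
              simp [PySem.Chars.startswith, hp]
            rw [hsw]
            simp only [List.length_nil, Int.natCast_zero, add_zero]
            rw [← hrec]
            by_cases h0 : count = 0
            · simp [h0]
            · have h0b : (count == 0) = false := by simp [h0]
              cases seen with
              | true =>
                  by_cases hm : count = m
                  · by_cases hm0 : m = 0 <;> simp [hm, hm0]
                  · have hnb : (count != m) = true := by simp [hm]
                    simp [h0b, hm, hnb]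
              | false =>
                  by_cases hr : 1 ≤ count ∧ count ≤ m
                  · simp [h0b, hr]
                  · simp [h0b, hr]
          · rw [pv_P_neg sp f c rest hp]
            have hsw : PySem.Chars.startswith (c :: rest) sp = false := by
              unfold PySem.Chars.startswith
              revert hp
              cases sp.isPrefixOf (c :: rest) <;> simp
            simp only [pvBScan, hsw]
            have hne := pv_go_ne_nil sp f rest [] []
            by_cases hc : PySem.Chars.isdigit c = true
            · rw [pv_chk_mapHead_digit m count seen c hc _ hne]
              simp only [hc, if_true]
              simp at h
              exact ih rest (count + 1) seen (by omega)
            · have hc' : PySem.Chars.isdigit c = false := by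
                cases hcc : PySem.Chars.isdigit c
                · rfl
                · exact absurd hcc hc
              rw [pv_chk_mapHead_nondigit m count seen c hc' _ hne]
              simp [hc']

-- A's size loop equals pvSizesRev
theorem pv_aloop_eq_sizesRev (m : Int) (n : Nat) :
    ∀ (r : List (List Char)) (idx : Nat), idx + r.length = n + 1 →
      pvALoop m n r idx = pvSizesRev m r := by
  intro r
  induction r with
  | nil => intro idx h; rfl
  | cons p rest ih =>
      intro idx h
      cases rest with
      | nil =>
          have hidx : idx = n := by simp at h; omega
          rw [pvALoop, if_pos hidx]
          by_cases hr : 1 ≤ (p.length : Int) ∧ (p.length : Int) ≤ m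
          · rw [if_neg (not_not_intro hr)]
            show pvALoop m n [] (idx + 1) = pvSizesRev m [p]
            rw [pvALoop, pvSizesRev, decide_eq_true hr]
          · rw [if_pos hr]
            rw [pvSizesRev, decide_eq_false hr]
      | cons q qs =>
          have hidx : idx ≠ n := by simp at h; omega
          rw [pvALoop, if_neg hidx]
          by_cases he : (p.length : Int) = m
          · rw [if_neg (not_not_intro he)]
            rw [ih (idx + 1) (by simp at h ⊢; omega)]
            show pvSizesRev m (q :: qs) = pvSizesRev m (p :: q :: qs)
            rw [pvSizesRev, decide_eq_true he, Bool.true_and]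
          · rw [if_pos he]
            have hs : pvSizesRev m (p :: q :: qs)
                = (decide ((p.length : Int) = m) && pvSizesRev m (q :: qs)) := rfl
            rw [hs, decide_eq_false he, Bool.false_and]

theorem pv_sizesRev_append (m : Int) :
    ∀ (l : List (List Char)) (p : List Char),
      pvSizesRev m (l ++ [p])
        = (l.all (fun q => decide ((q.length : Int) = m)) &&
           decide (1 ≤ (p.length : Int) ∧ (p.length : Int) ≤ m)) := by
  intro l
  induction l with
  | nil => intro p; simp [pvSizesRev]
  | cons a l ih =>
      intro p
      cases l with
      | nil => simp [pvSizesRev]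
      | cons b l' =>
          have hs : pvSizesRev m (a :: b :: (l' ++ [p]))
              = (decide ((a.length : Int) = m) && pvSizesRev m (b :: (l' ++ [p]))) := rfl
          rw [List.cons_append, List.cons_append, hs]
          rw [show b :: (l' ++ [p]) = (b :: l') ++ [p] from rfl, ih p]
          simp [Bool.and_assoc]

theorem pv_chk_true_eq (m : Int) :
    ∀ (ps : List (List Char)),
      pvChk m 0 true ps
        = ps.all (fun p => p.all PySem.Chars.isdigit && (!((p.length : Int) == 0) && ((p.length : Int) == m))) := by
  intro ps
  induction ps with
  | nil => rfl
  | cons p rest ih => rw [pv_chk_head, ih]; simp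

-- A's whole post-guard check equals pvChk 0 false
theorem pv_acheck_eq_chk (m : Int) (p : List Char) (rest : List (List Char)) :
    (if ¬ ((p :: rest).all fun part => PySem.Chars.strIsdigit part && decide (0 < part.length)) then false
     else pvALoop m (p :: rest).length (p :: rest).reverse 1)
      = pvChk m 0 false (p :: rest) := by
  rw [pv_aloop_eq_sizesRev m (p :: rest).length (p :: rest).reverse 1
    (by simp only [List.length_reverse, List.length_cons]; omega)]
  rw [pv_chk_head, pv_chk_true_eq]
  have hrev : (p :: rest).reverse = rest.reverse ++ [p] := by simp
  rw [hrev, pv_sizesRev_append]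
  rw [Bool.eq_iff_iff]
  simp [PySem.Chars.strIsdigit, List.all_eq_true, List.length_pos_iff]
  constructor
  · rintro ⟨⟨hpne, hpdig, -, hrest⟩, hlen, h1, h2⟩
    exact ⟨⟨hpdig, hpne, h1, h2⟩, fun x hx => ⟨(hrest x hx).2.1, (hrest x hx).1, hlen x hx⟩⟩
  · rintro ⟨⟨hpdig, hpne, h1, h2⟩, hrest⟩
    exact ⟨⟨hpne, hpdig, hpne, fun x hx => ⟨(hrest x hx).2.1, (hrest x hx).1, (hrest x hx).2.1⟩⟩,
      fun x hx => (hrest x hx).2.2, h1, h2⟩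

theorem pv_sp_ne_nil (cs sp : List Char) (h : PySem.Chars.startswith cs sp = false) : sp ≠ [] := by
  intro hnil
  subst hnil
  simp [PySem.Chars.startswith, List.isPrefixOf] at h

-- ===== VERDICT (by name: the statement is the Claim_ definition above) =====
theorem check_grouping_core_py_spec : Claim_equal_check_grouping_core_py := by
  intro s m sep _hdom
  unfold Spec_check_grouping_core_py check_grouping_core_py check_grouping_core_py_alt
  simp only []
  by_cases h1 : (PySem.Chars.startswith s.toList sep.toList || PySem.Chars.endswith s.toList sep.toList) = true
  · simp [h1]
  · have h1' := h1
    simp only [Bool.or_eq_true, not_or, Bool.not_eq_true] at h1'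
    have hsp : sep.toList ≠ [] := pv_sp_ne_nil s.toList sep.toList h1'.1
    simp only [h1, if_false, Bool.false_eq_true]
    by_cases h2 : PySem.Chars.isIn (sep.toList ++ sep.toList) s.toList = true
    · simp [h2]
    · simp only [h2, if_false, Bool.false_eq_true]
      rw [pv_bscan_eq_chk sep.toList m hsp (s.toList.length + 1) s.toList 0 false (by omega)]
      have hparts : PySem.Chars.splitOn s.toList sep.toList
          = PySem.Chars.splitOn.go sep.toList (s.toList.length + 1) s.toList [] [] := rfl
      rw [hparts] at *
      cases hgo : PySem.Chars.splitOn.go sep.toList (s.toList.length + 1) s.toList [] [] with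
      | nil => exact absurd hgo (pv_go_ne_nil _ _ _ _ _)
      | cons p rest => exact pv_acheck_eq_chk m p rest
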